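-- pv_equiv track=rewrite | github.com/medve/MyAlgoPractice | harshad.py | right_trunc_harshad
-- ===== SOURCE A (Python) =====
-- from collections import deque
--
-- def right_trunc_harshad(n):
--     queue = deque()
--     cur_num = (1,1)
--     for x in range(2,10):
--         queue.appendleft((x,x))
--     while cur_num[0]*10 < n:
--         for digit in range(10):
--             new_num = cur_num[0]*10 + digit
--             new_sum = cur_num[1] + digit
--             if new_num >= n:
--                 break
--             if new_num % new_sum == 0:
--                 queue.appendleft((new_num,new_sum))
--                 yield (new_num,new_sum)
--         cur_num = queue.pop()
-- ===== SOURCE B (Python) =====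
-- def right_trunc_harshad(n):
--     # DFS over the tree of right-truncatable Harshad numbers, then sort by value
--     # (the values are pairwise distinct, so sorting by the number alone suffices).
--     res = []
--
--     def build(num, dsum):
--         for digit in range(10):
--             new_num = num * 10 + digit
--             if new_num >= n:
--                 break
--             new_sum = dsum + digit
--             if new_num % new_sum == 0:
--                 res.append((new_num, new_sum))
--                 build(new_num, new_sum)
--
--     for x in range(1, 10):
--         build(x, x)
--     res.sort(key=lambda t: t[0])
--     yield from res
-- ===== Notes on version B (the rewrite author's own statement) =====
-- stated objective: alternative
-- what changed: Replaces the deque-based streaming BFS (which yields children while popping a FIFO queue) by a recursive DFS that collects all right-truncatable Harshad numbers below n into a list and sorts it by value (A's BFS order is exactly increasing numeric order).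
import Mathlib
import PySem

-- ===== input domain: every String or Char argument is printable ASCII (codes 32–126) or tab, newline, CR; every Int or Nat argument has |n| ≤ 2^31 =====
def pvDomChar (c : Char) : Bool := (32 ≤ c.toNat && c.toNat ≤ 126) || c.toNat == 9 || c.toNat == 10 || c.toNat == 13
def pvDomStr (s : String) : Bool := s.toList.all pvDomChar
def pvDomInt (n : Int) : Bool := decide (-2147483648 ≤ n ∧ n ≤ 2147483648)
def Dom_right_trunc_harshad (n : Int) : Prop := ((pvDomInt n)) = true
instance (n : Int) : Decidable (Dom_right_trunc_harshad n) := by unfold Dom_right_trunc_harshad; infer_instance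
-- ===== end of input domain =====

-- B replaces A's deque-based streaming BFS by a recursive DFS that collects the numbers
-- and sorts them by value (A's BFS order is exactly increasing numeric order); alternative
-- decomposition, similar cost.

-- ===== PORT A =====
-- the inner `for digit in range(10)` loop of A: yields/pushes children, `break` on new_num >= n
def pvChildA (n num s : Int) : List Int → List (Int × Int)
  | [] => []
  | d :: ds =>
    if n ≤ num * 10 + d then []
    else if PySem.Int.mod (num * 10 + d) (s + d) = 0 then
      (num * 10 + d, s + d) :: pvChildA n num s ds
    else pvChildA n num s ds

-- the `while cur_num[0]*10 < n` loop; the deque is represented with its pop end first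
-- (appendleft = append at the list's tail).  Fuel only makes the loop total: the popped
-- values strictly increase and must stay below n, so n.toNat + 1 iterations never run out.
-- On `queue.pop()` from an empty queue Python would raise; that state is unreachable and the
-- port simply stops there (the children list is empty in that case).
def pvLoopA (n : Int) : Nat → (Int × Int) → List (Int × Int) → List (Int × Int)
  | 0, _, _ => []
  | fuel + 1, cur, q =>
    if cur.1 * 10 < n then
      let ys := pvChildA n cur.1 cur.2 (PySem.List.pyRange 0 10 1)
      match q ++ ys with
      | [] => ys
      | c :: q' => ys ++ pvLoopA n fuel c q'
    else []

def right_trunc_harshad (n : Int) : List (Int × Int) :=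
  pvLoopA n (n.toNat + 1) (1, 1) ((PySem.List.pyRange 2 10 1).map (fun x => (x, x)))

-- ===== PORT B =====
-- B's recursive helper `build(num, dsum)`: the digit loop is structural on the digit list,
-- the recursion into a child carries fuel (totality only; depth is the digit count < n's size).
def pvBuildB (n : Int) : Nat → Int → Int → List Int → List (Int × Int)
  | _, _, _, [] => []
  | fuel, num, dsum, d :: ds =>
    if n ≤ num * 10 + d then []
    else if PySem.Int.mod (num * 10 + d) (dsum + d) = 0 then
      ((num * 10 + d, dsum + d) ::
        (match fuel with
         | 0 => []
         | f + 1 => pvBuildB n f (num * 10 + d) (dsum + d) (PySem.List.pyRange 0 10 1)))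
        ++ pvBuildB n fuel num dsum ds
    else pvBuildB n fuel num dsum ds
termination_by fuel _ _ ds => (fuel, ds.length)

def right_trunc_harshad_alt (n : Int) : List (Int × Int) :=
  PySem.List.sorted
    ((PySem.List.pyRange 1 10 1).flatMap
      (fun x => pvBuildB n (n.toNat + 1) x x (PySem.List.pyRange 0 10 1)))
    (fun t => t.1) false

-- ===== PRECONDITION & SPEC =====
def Spec_right_trunc_harshad (n : Int) (out : List (Int × Int)) : Prop := out = right_trunc_harshad_alt n
instance (n : Int) (out : List (Int × Int)) : Decidable (Spec_right_trunc_harshad n out) := by unfold Spec_right_trunc_harshad; infer_instance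

-- ===== CLAIM (what is proved, stated in full; the proofs are below) =====
def Claim_equal_right_trunc_harshad : Prop := ∀ (n : Int), Dom_right_trunc_harshad n → Spec_right_trunc_harshad n (right_trunc_harshad n)

-- ===== LEMMAS AND PROOFS =====

-- children of a node (num, s): the filter form of the digit loop
def pvChn (n : Int) (p : Int × Int) : List (Int × Int) :=
  (PySem.List.pyRange 0 10 1).filterMap
    (fun d => if p.1 * 10 + d < n ∧ PySem.Int.mod (p.1 * 10 + d) (p.2 + d) = 0
              then some (p.1 * 10 + d, p.2 + d) else none)

-- strict descendants of a node in the harshad tree, below n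
inductive pvDesc (n : Int) : Int × Int → Int × Int → Prop
  | child {p y} : y ∈ pvChn n p → pvDesc n p y
  | trans {p y z} : y ∈ pvChn n p → pvDesc n y z → pvDesc n p z

lemma pvChildA_eq_filter (n a s : Int) :
    ∀ ds : List Int, ds.Pairwise (· ≤ ·) →
      pvChildA n a s ds =
        ds.filterMap (fun d => if a * 10 + d < n ∧ PySem.Int.mod (a * 10 + d) (s + d) = 0
                               then some (a * 10 + d, s + d) else none) := by
  intro ds hds
  induction ds with
  | nil => rfl
  | cons d ds ih =>
    rw [List.pairwise_cons] at hds
    obtain ⟨hd, hds'⟩ := hds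
    by_cases h1 : n ≤ a * 10 + d
    · have hnone : ∀ d' ∈ d :: ds,
          (if a * 10 + d' < n ∧ PySem.Int.mod (a * 10 + d') (s + d') = 0
           then some (a * 10 + d', s + d') else none) = none := by
        intro d' hd'
        have hle : d ≤ d' := by
          rcases List.mem_cons.mp hd' with h | h
          · omega
          · exact hd d' h
        rw [if_neg]
        rintro ⟨hlt, -⟩
        omega
      rw [List.filterMap_eq_nil_iff.mpr hnone]
      simp [pvChildA, if_pos h1]
    · by_cases h2 : PySem.Int.mod (a * 10 + d) (s + d) = 0
      · simp only [pvChildA, if_neg h1, if_pos h2, List.filterMap_cons]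
        rw [if_pos (And.intro (by omega : a * 10 + d < n) h2), ih hds']
      · simp only [pvChildA, if_neg h1, if_neg h2, List.filterMap_cons]
        rw [if_neg (fun hc => h2 hc.2), ih hds']

lemma pvChildA_eq_chn (n a s : Int) :
    pvChildA n a s (PySem.List.pyRange 0 10 1) = pvChn n (a, s) := by
  rw [pvChildA_eq_filter n a s _ ((PySem.List.pairwise_lt_pyRange_one 0 10).imp (by intro a b h; omega))]
  rfl

lemma pvMem_chn {n : Int} {p y : Int × Int} :
    y ∈ pvChn n p ↔ ∃ d, 0 ≤ d ∧ d < 10 ∧ p.1 * 10 + d < n ∧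
      PySem.Int.mod (p.1 * 10 + d) (p.2 + d) = 0 ∧ y = (p.1 * 10 + d, p.2 + d) := by
  simp only [pvChn, List.mem_filterMap, PySem.List.mem_pyRange_one]
  constructor
  · rintro ⟨d, ⟨h0, h10⟩, hif⟩
    split_ifs at hif with hc
    · exact ⟨d, h0, h10, hc.1, hc.2, (Option.some_inj.mp hif).symm⟩
  · rintro ⟨d, h0, h10, hlt, hmod, rfl⟩
    exact ⟨d, ⟨h0, h10⟩, by rw [if_pos ⟨hlt, hmod⟩]⟩

lemma pvChn_bounds {n : Int} {p y : Int × Int} (h : y ∈ pvChn n p) :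
    p.1 * 10 ≤ y.1 ∧ y.1 < p.1 * 10 + 10 ∧ y.1 < n := by
  obtain ⟨d, h0, h10, hlt, -, rfl⟩ := pvMem_chn.mp h
  constructor
  · simp; omega
  · constructor
    · simp; omega
    · simpa using hlt

lemma pvChn_pairwise (n : Int) (p : Int × Int) :
    (pvChn n p).Pairwise (fun u v => u.1 < v.1) := by
  apply List.Pairwise.filterMap
  swap
  · exact PySem.List.pairwise_lt_pyRange_one 0 10
  · intro a b hab u hu v hv
    split_ifs at hu hv
    simp only [Option.some_inj] at hu hv
    subst hu; subst hv
    simp; omega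

lemma pvDesc_gt {n : Int} {p y : Int × Int} (hp : 1 ≤ p.1) (h : pvDesc n p y) : p.1 < y.1 := by
  revert hp
  induction h with
  | child hy => intro hp; have := pvChn_bounds hy; omega
  | trans hy _ ih =>
    intro hp
    have hb := pvChn_bounds hy
    have := ih (by omega)
    omega

-- y = p or y a strict descendant: then p.1 is a decimal prefix of y.1
lemma pvPrefix {n : Int} {p y : Int × Int} (hp : 1 ≤ p.1)
    (h : y = p ∨ pvDesc n p y) : ∃ k : Nat, y.1.toNat / 10 ^ k = p.1.toNat := by
  rcases h with rfl | h
  · exact ⟨0, by simp⟩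
  revert hp
  induction h with
  | child hy =>
    intro hp
    have hb := pvChn_bounds hy
    exact ⟨1, by rw [pow_one]; omega⟩
  | trans hy _ ih =>
    intro hp
    have hb := pvChn_bounds hy
    obtain ⟨k, hk⟩ := ih (by omega)
    refine ⟨k + 1, ?_⟩
    rw [pow_succ, ← Nat.div_div_eq_div_mul, hk]
    omega

-- two decimal prefixes of the same number, each larger than the other's truncation, coincide
lemma pvPrefixUnique {W C C' : Nat} {k j : Nat}
    (h1 : W / 10 ^ k = C) (h2 : W / 10 ^ j = C') (hC : C / 10 < C') (hC' : C' / 10 < C) :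
    C = C' := by
  have step : ∀ (k j C C' : Nat), k ≤ j → W / 10 ^ k = C → W / 10 ^ j = C' →
      C / 10 < C' → C = C' := by
    intro k j C C' hkj h1 h2 hC
    rcases Nat.eq_or_lt_of_le hkj with rfl | hlt
    · omega
    · exfalso
      have hj : j = k + (j - k) := by omega
      rw [hj, pow_add, ← Nat.div_div_eq_div_mul, h1] at h2
      have h10 : (10 : Nat) ≤ 10 ^ (j - k) := by
        calc (10 : Nat) = 10 ^ 1 := (pow_one 10).symm
        _ ≤ 10 ^ (j - k) := Nat.pow_le_pow_right (by norm_num) (by omega)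
      have : C / 10 ^ (j - k) ≤ C / 10 := Nat.div_le_div_left h10 (by norm_num)
      omega
  rcases Nat.le_total k j with hkj | hkj
  · exact step k j C C' hkj h1 h2 hC
  · exact (step j k C' C hkj h2 h1 hC').symm

-- master BFS lemma: sortedness, lower bound, and membership of A's loop
lemma pvDesc_child {n : Int} {p y : Int × Int} (h : pvDesc n p y) : ∃ c, c ∈ pvChn n p := by
  cases h with
  | child hy => exact ⟨_, hy⟩
  | trans hy _ => exact ⟨_, hy⟩

lemma pvDesc_none {n : Int} {p y : Int × Int} (hp : n ≤ p.1 * 10) (h : pvDesc n p y) : False := by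
  obtain ⟨c, hc⟩ := pvDesc_child h
  have := pvChn_bounds hc
  omega

lemma pvLoopA_master (n : Int) :
    ∀ (fuel : Nat) (cur : Int × Int) (q : List (Int × Int)),
      1 ≤ cur.1 →
      (∀ x ∈ q, cur.1 < x.1) →
      q.Pairwise (fun u v => u.1 < v.1) →
      (∀ x ∈ q, x.1 < cur.1 * 10) →
      (n - cur.1).toNat ≤ fuel →
      (pvLoopA n fuel cur q).Pairwise (fun u v => u.1 < v.1) ∧
      (∀ y ∈ pvLoopA n fuel cur q, cur.1 * 10 ≤ y.1) ∧
      (∀ y, y ∈ pvLoopA n fuel cur q ↔ ∃ p ∈ cur :: q, pvDesc n p y) := by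
  intro fuel
  induction fuel with
  | zero =>
    intro cur q h1 hgt hpw hlt hfuel
    refine ⟨by simp [pvLoopA], by simp [pvLoopA], ?_⟩
    intro y
    simp only [pvLoopA, List.not_mem_nil, false_iff]
    rintro ⟨p, hp, hdesc⟩
    have hpge : cur.1 ≤ p.1 := by
      rcases List.mem_cons.mp hp with rfl | hp
      · omega
      · exact le_of_lt (hgt p hp)
    exact pvDesc_none (by omega) hdesc
  | succ f ih =>
    intro cur q h1 hgt hpw hlt hfuel
    by_cases hcond : cur.1 * 10 < n
    · simp only [pvLoopA, if_pos hcond, pvChildA_eq_chn, Prod.mk.eta]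
      have hys_pw := pvChn_pairwise n cur
      have hys_b : ∀ y ∈ pvChn n cur, cur.1 * 10 ≤ y.1 ∧ y.1 < cur.1 * 10 + 10 :=
        fun y hy => ⟨(pvChn_bounds hy).1, (pvChn_bounds hy).2.1⟩
      rcases hq : q ++ pvChn n cur with _ | ⟨c, q'⟩
      · have hys : pvChn n cur = [] := (List.append_eq_nil_iff.mp hq).2
        rw [hys]
        refine ⟨List.Pairwise.nil, by simp, ?_⟩
        intro y
        simp only [List.not_mem_nil, false_iff]
        rintro ⟨p, hp, hdesc⟩
        have hq' : q = [] := (List.append_eq_nil_iff.mp hq).1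
        rcases List.mem_cons.mp hp with rfl | hpq
        · obtain ⟨d, hd⟩ := pvDesc_child hdesc
          rw [hys] at hd
          exact absurd hd (List.not_mem_nil)
        · rw [hq'] at hpq; exact absurd hpq (List.not_mem_nil)
      · -- the queue is nonempty: pop c, recurse
        have hmemqy : ∀ x ∈ q ++ pvChn n cur, cur.1 < x.1 ∧ x.1 < cur.1 * 10 + 10 := by
          intro x hx
          rcases List.mem_append.mp hx with hx | hx
          · exact ⟨hgt x hx, by have := hlt x hx; omega⟩
          · have := hys_b x hx; omega
        have hqy_pw : (q ++ pvChn n cur).Pairwise (fun u v => u.1 < v.1) := by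
          rw [List.pairwise_append]
          exact ⟨hpw, hys_pw, fun u hu v hv => by
            have := hlt u hu; have := hys_b v hv; omega⟩
        rw [hq] at hqy_pw
        have hc1 : cur.1 < c.1 := (hmemqy c (by rw [hq]; exact List.mem_cons_self)).1
        have hq'_gt : ∀ x ∈ q', c.1 < x.1 := fun x hx =>
          (List.pairwise_cons.mp hqy_pw).1 x hx
        have hq'_pw := (List.pairwise_cons.mp hqy_pw).2
        have hq'_lt : ∀ x ∈ q', x.1 < c.1 * 10 := by
          intro x hx
          have hx2 := hmemqy x (by rw [hq]; exact List.mem_cons_of_mem _ hx)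
          omega
        obtain ⟨ihpw, ihlb, ihmem⟩ := ih c q' (by omega) hq'_gt hq'_pw hq'_lt (by omega)
        refine ⟨?_, ?_, ?_⟩
        · rw [List.pairwise_append]
          refine ⟨hys_pw, ihpw, fun u hu v hv => ?_⟩
          have := hys_b u hu; have := ihlb v hv; omega
        · intro y hy
          rcases List.mem_append.mp hy with hy | hy
          · exact (hys_b y hy).1
          · have := ihlb y hy; omega
        · intro y
          rw [List.mem_append, ihmem y]
          constructor
          · rintro (hy | ⟨p, hp, hdesc⟩)
            · exact ⟨cur, List.mem_cons_self, pvDesc.child hy⟩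
            · have hp2 : p ∈ q ++ pvChn n cur := by rw [hq]; exact hp
              rcases List.mem_append.mp hp2 with hpq | hpy
              · exact ⟨p, List.mem_cons_of_mem _ hpq, hdesc⟩
              · exact ⟨cur, List.mem_cons_self, pvDesc.trans hpy hdesc⟩
          · rintro ⟨p, hp, hdesc⟩
            rcases List.mem_cons.mp hp with rfl | hpq
            · cases hdesc with
              | child hy => exact Or.inl hy
              | trans hz hdesc =>
                exact Or.inr ⟨_, by rw [← hq]; exact List.mem_append.mpr (Or.inr hz), hdesc⟩
            · exact Or.inr ⟨p, by rw [← hq]; exact List.mem_append.mpr (Or.inl hpq), hdesc⟩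
    · simp only [pvLoopA, if_neg hcond]
      refine ⟨List.Pairwise.nil, by simp, ?_⟩
      intro y
      simp only [List.not_mem_nil, false_iff]
      rintro ⟨p, hp, hdesc⟩
      have hpge : cur.1 ≤ p.1 := by
        rcases List.mem_cons.mp hp with rfl | hp
        · omega
        · exact le_of_lt (hgt p hp)
      exact pvDesc_none (by omega) hdesc

lemma pvDesc_iff_digits {n a s : Int} {y : Int × Int} :
    (∃ d ∈ PySem.List.pyRange 0 10 1, a * 10 + d < n ∧ PySem.Int.mod (a * 10 + d) (s + d) = 0 ∧
      (y = (a * 10 + d, s + d) ∨ pvDesc n (a * 10 + d, s + d) y)) ↔ pvDesc n (a, s) y := by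
  constructor
  · rintro ⟨d, hd, hlt, hmod, hy⟩
    rw [PySem.List.mem_pyRange_one] at hd
    have hc : ((a : Int) * 10 + d, s + d) ∈ pvChn n (a, s) :=
      pvMem_chn.mpr ⟨d, hd.1, hd.2, hlt, hmod, rfl⟩
    rcases hy with rfl | hy
    · exact pvDesc.child hc
    · exact pvDesc.trans hc hy
  · intro h
    cases h with
    | child hy =>
      obtain ⟨d, h0, h10, hlt, hmod, rfl⟩ := pvMem_chn.mp hy
      exact ⟨d, PySem.List.mem_pyRange_one.mpr ⟨h0, h10⟩, hlt, hmod, Or.inl rfl⟩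
    | trans hz hdesc =>
      obtain ⟨d, h0, h10, hlt, hmod, hzeq⟩ := pvMem_chn.mp hz
      exact ⟨d, PySem.List.mem_pyRange_one.mpr ⟨h0, h10⟩, hlt, hmod, Or.inr (hzeq ▸ hdesc)⟩

-- master DFS lemma: membership and nodup of B's builder
lemma pvBuildB_master (n : Int) :
    ∀ (fuel : Nat) (a s : Int) (ds : List Int),
      1 ≤ a →
      ds.Pairwise (· < ·) →
      (∀ d ∈ ds, 0 ≤ d ∧ d < 10) →
      (n - a).toNat ≤ fuel →
      (∀ y, y ∈ pvBuildB n fuel a s ds ↔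
        ∃ d ∈ ds, a * 10 + d < n ∧ PySem.Int.mod (a * 10 + d) (s + d) = 0 ∧
          (y = (a * 10 + d, s + d) ∨ pvDesc n (a * 10 + d, s + d) y)) ∧
      (pvBuildB n fuel a s ds).Nodup := by
  intro fuel
  induction fuel with
  | zero =>
    intro a s ds h1 hpw hdig hfuel
    have hna : n ≤ a := by omega
    cases ds with
    | nil => simp [pvBuildB]
    | cons d ds =>
      have hd0 := hdig d List.mem_cons_self
      have hbreak : n ≤ a * 10 + d := by omega
      rw [pvBuildB, if_pos hbreak]
      refine ⟨?_, List.nodup_nil⟩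
      intro y
      simp only [List.not_mem_nil, false_iff]
      rintro ⟨d₀, hd₀, hlt, -⟩
      have := hdig d₀ hd₀
      omega
  | succ f ihf =>
    intro a s ds h1 hpw hdig hfuel
    induction ds with
    | nil => simp [pvBuildB]
    | cons d ds ihds =>
      have hd0 := hdig d List.mem_cons_self
      have hgtd : ∀ d' ∈ ds, d < d' := (List.pairwise_cons.mp hpw).1
      have hpw' := (List.pairwise_cons.mp hpw).2
      have hdig' : ∀ d' ∈ ds, 0 ≤ d' ∧ d' < 10 :=
        fun d' h => hdig d' (List.mem_cons_of_mem _ h)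
      obtain ⟨restmem, restnodup⟩ := ihds hpw' hdig'
      by_cases hbr : n ≤ a * 10 + d
      · rw [pvBuildB, if_pos hbr]
        refine ⟨?_, List.nodup_nil⟩
        intro y
        simp only [List.not_mem_nil, false_iff]
        rintro ⟨d₀, hd₀, hlt, -⟩
        rcases List.mem_cons.mp hd₀ with rfl | hd₀
        · omega
        · have := hgtd d₀ hd₀; omega
      · by_cases hmod : PySem.Int.mod (a * 10 + d) (s + d) = 0
        · rw [pvBuildB, if_neg hbr, if_pos hmod]
          obtain ⟨submem, subnodup⟩ := ihf (a * 10 + d) (s + d) (PySem.List.pyRange 0 10 1)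
            (by omega) (PySem.List.pairwise_lt_pyRange_one 0 10)
            (fun d' h => by have := PySem.List.mem_pyRange_one.mp h; exact ⟨this.1, this.2⟩)
            (by omega)
          have submem' : ∀ y, y ∈ pvBuildB n f (a * 10 + d) (s + d) (PySem.List.pyRange 0 10 1) ↔
              pvDesc n (a * 10 + d, s + d) y :=
            fun y => (submem y).trans pvDesc_iff_digits
          constructor
          · intro y
            simp only [List.cons_append, List.mem_cons, List.mem_append, submem' y, restmem y]
            constructor
            · rintro (rfl | hy | hy)
              · exact ⟨d, Or.inl rfl, by omega, hmod, Or.inl rfl⟩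
              · exact ⟨d, Or.inl rfl, by omega, hmod, Or.inr hy⟩
              · obtain ⟨d₀, hd₀, h⟩ := hy
                exact ⟨d₀, Or.inr hd₀, h⟩
            · rintro ⟨d₀, rfl | hd₀, hlt, hm, hy⟩
              · rcases hy with rfl | hy
                · exact Or.inl rfl
                · exact Or.inr (Or.inl hy)
              · exact Or.inr (Or.inr ⟨d₀, hd₀, hlt, hm, hy⟩)
          · rw [List.cons_append, List.nodup_cons, List.nodup_append]
            have hdisj : ∀ y, (y = (a * 10 + d, s + d) ∨ pvDesc n (a * 10 + d, s + d) y) →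
                y ∈ pvBuildB n (f + 1) a s ds → False := by
              intro y hy hyrest
              obtain ⟨d₀, hd₀, hlt₀, hm₀, hy₀⟩ := (restmem y).mp hyrest
              have hdlt : d < d₀ := hgtd d₀ hd₀
              have hd₀b := hdig' d₀ hd₀
              obtain ⟨k, hk⟩ := pvPrefix (n := n) (p := (a * 10 + d, s + d))
                (show (1 : Int) ≤ a * 10 + d by omega) hy
              obtain ⟨j, hj⟩ := pvPrefix (n := n) (p := (a * 10 + d₀, s + d₀))
                (show (1 : Int) ≤ a * 10 + d₀ by omega) hy₀
              have heq : (a * 10 + d).toNat = (a * 10 + d₀).toNat :=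
                pvPrefixUnique hk hj
                  (show (a * 10 + d).toNat / 10 < (a * 10 + d₀).toNat by omega)
                  (show (a * 10 + d₀).toNat / 10 < (a * 10 + d).toNat by omega)
              omega
            refine ⟨?_, subnodup, restnodup, ?_⟩
            · intro hmem
              rcases List.mem_append.mp hmem with hmem | hmem
              · have := pvDesc_gt (show (1 : Int) ≤ ((a * 10 + d, s + d) : Int × Int).1 by simp; omega)
                  ((submem' _).mp hmem)
                exact absurd this (lt_irrefl _)
              · exact hdisj _ (Or.inl rfl) hmem
            · intro u hu v hv heq
              subst heq
              exact hdisj u (Or.inr ((submem' u).mp hu)) hv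
        · rw [pvBuildB, if_neg hbr, if_neg hmod]
          refine ⟨?_, restnodup⟩
          intro y
          rw [restmem y]
          constructor
          · rintro ⟨d₀, hd₀, h⟩
            exact ⟨d₀, List.mem_cons_of_mem _ hd₀, h⟩
          · rintro ⟨d₀, hd₀, hlt, hm, hy⟩
            rcases List.mem_cons.mp hd₀ with rfl | hd₀
            · exact absurd hm hmod
            · exact ⟨d₀, hd₀, hlt, hm, hy⟩

-- the DFS results of distinct roots are disjoint, so the flattened list has no duplicates
lemma pvFlat_nodup (n : Int) :
    ∀ xs : List Int, xs.Pairwise (· < ·) → (∀ x ∈ xs, 1 ≤ x ∧ x < 10) →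
      (xs.flatMap (fun x => pvBuildB n (n.toNat + 1) x x (PySem.List.pyRange 0 10 1))).Nodup := by
  intro xs
  induction xs with
  | nil => intro _ _; simp
  | cons x xs ih =>
    intro hpw hb
    have hx := hb x List.mem_cons_self
    have hpw' := (List.pairwise_cons.mp hpw).2
    have hgtx := (List.pairwise_cons.mp hpw).1
    have hb' : ∀ x' ∈ xs, 1 ≤ x' ∧ x' < 10 := fun x' h => hb x' (List.mem_cons_of_mem _ h)
    have master := fun (v : Int) (hv : 1 ≤ v) => pvBuildB_master n (n.toNat + 1) v v
      (PySem.List.pyRange 0 10 1) hv (PySem.List.pairwise_lt_pyRange_one 0 10)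
      (fun d' h => by have := PySem.List.mem_pyRange_one.mp h; exact ⟨this.1, this.2⟩)
      (by omega)
    have hmemdesc : ∀ (v : Int), 1 ≤ v → ∀ y,
        y ∈ pvBuildB n (n.toNat + 1) v v (PySem.List.pyRange 0 10 1) → pvDesc n (v, v) y :=
      fun v hv y hy => pvDesc_iff_digits.mp (((master v hv).1 y).mp hy)
    rw [List.flatMap_cons, List.nodup_append]
    refine ⟨(master x hx.1).2, ih hpw' hb', ?_⟩
    intro u hu v hv heq
    subst heq
    obtain ⟨x', hx'm, hv'⟩ := List.mem_flatMap.mp hv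
    have hx'b := hb' x' hx'm
    have hdesc1 := hmemdesc x hx.1 u hu
    have hdesc2 := hmemdesc x' hx'b.1 u hv'
    obtain ⟨k, hk⟩ := pvPrefix (n := n) (p := ((x : Int), x))
      (show (1 : Int) ≤ x by omega) (Or.inr hdesc1)
    obtain ⟨j, hj⟩ := pvPrefix (n := n) (p := ((x' : Int), x'))
      (show (1 : Int) ≤ x' by omega) (Or.inr hdesc2)
    have heq : x.toNat = x'.toNat :=
      pvPrefixUnique hk hj
        (show x.toNat / 10 < x'.toNat by omega)
        (show x'.toNat / 10 < x.toNat by omega)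
    have := hgtx x' hx'm
    omega

-- ===== VERDICT (by name: the statement is the Claim_ definition above) =====
theorem right_trunc_harshad_spec : Claim_equal_right_trunc_harshad := by
  intro n _
  unfold Spec_right_trunc_harshad
  unfold right_trunc_harshad right_trunc_harshad_alt
  -- characterize A's BFS run
  obtain ⟨hApw, -, hAmem⟩ := pvLoopA_master n (n.toNat + 1) (1, 1)
    ((PySem.List.pyRange 2 10 1).map (fun x => (x, x)))
    (by norm_num)
    (by
      intro p hp
      obtain ⟨v, hv, rfl⟩ := List.mem_map.mp hp
      have := PySem.List.mem_pyRange_one.mp hv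
      simp; omega)
    (List.Pairwise.map _ (fun a b (h : a < b) => (by simpa using h : ((a, a) : Int × Int).1 < (b, b).1))
      (PySem.List.pairwise_lt_pyRange_one 2 10))
    (by
      intro p hp
      obtain ⟨v, hv, rfl⟩ := List.mem_map.mp hp
      have := PySem.List.mem_pyRange_one.mp hv
      simp; omega)
    (by omega)
  -- characterize B's DFS run
  have hBmem : ∀ y, y ∈ (PySem.List.pyRange 1 10 1).flatMap
      (fun x => pvBuildB n (n.toNat + 1) x x (PySem.List.pyRange 0 10 1)) ↔
      ∃ x ∈ PySem.List.pyRange 1 10 1, pvDesc n (x, x) y := by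
    intro y
    rw [List.mem_flatMap]
    constructor
    · rintro ⟨x, hx, hy⟩
      have hxb := PySem.List.mem_pyRange_one.mp hx
      have master := pvBuildB_master n (n.toNat + 1) x x (PySem.List.pyRange 0 10 1)
        (by omega) (PySem.List.pairwise_lt_pyRange_one 0 10)
        (fun d' h => by have := PySem.List.mem_pyRange_one.mp h; exact ⟨this.1, this.2⟩)
        (by omega)
      exact ⟨x, hx, pvDesc_iff_digits.mp ((master.1 y).mp hy)⟩
    · rintro ⟨x, hx, hy⟩
      have hxb := PySem.List.mem_pyRange_one.mp hx
      have master := pvBuildB_master n (n.toNat + 1) x x (PySem.List.pyRange 0 10 1)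
        (by omega) (PySem.List.pairwise_lt_pyRange_one 0 10)
        (fun d' h => by have := PySem.List.mem_pyRange_one.mp h; exact ⟨this.1, this.2⟩)
        (by omega)
      exact ⟨x, hx, (master.1 y).mpr (pvDesc_iff_digits.mpr hy)⟩
  have hBnodup := pvFlat_nodup n (PySem.List.pyRange 1 10 1)
    (PySem.List.pairwise_lt_pyRange_one 1 10)
    (fun x h => by have := PySem.List.mem_pyRange_one.mp h; exact ⟨this.1, this.2⟩)
  have hAnodup : (pvLoopA n (n.toNat + 1) (1, 1)
      ((PySem.List.pyRange 2 10 1).map (fun x => (x, x)))).Nodup :=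
    hApw.imp (fun h heq => by rw [heq] at h; exact lt_irrefl _ h)
  -- the two runs enumerate the same set of tree nodes
  have hsame : ∀ y, y ∈ pvLoopA n (n.toNat + 1) (1, 1)
      ((PySem.List.pyRange 2 10 1).map (fun x => (x, x))) ↔
      y ∈ (PySem.List.pyRange 1 10 1).flatMap
        (fun x => pvBuildB n (n.toNat + 1) x x (PySem.List.pyRange 0 10 1)) := by
    intro y
    rw [hAmem y, hBmem y]
    constructor
    · rintro ⟨p, hp, hdesc⟩
      rcases List.mem_cons.mp hp with rfl | hp
      · exact ⟨1, PySem.List.mem_pyRange_one.mpr (by norm_num), hdesc⟩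
      · obtain ⟨v, hv, rfl⟩ := List.mem_map.mp hp
        have := PySem.List.mem_pyRange_one.mp hv
        exact ⟨v, PySem.List.mem_pyRange_one.mpr (by omega), hdesc⟩
    · rintro ⟨x, hx, hdesc⟩
      have hxb := PySem.List.mem_pyRange_one.mp hx
      by_cases hx1 : x = 1
      · subst hx1
        exact ⟨(1, 1), List.mem_cons_self, hdesc⟩
      · refine ⟨(x, x), List.mem_cons_of_mem _ ?_, hdesc⟩
        exact List.mem_map.mpr ⟨x, PySem.List.mem_pyRange_one.mpr (by omega), rfl⟩
  have hperm := List.perm_of_nodup_nodup_toFinset_eq hAnodup hBnodup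
    (by
      ext y
      rw [List.mem_toFinset, List.mem_toFinset]
      exact hsame y)
  exact (PySem.List.sorted_eq_of_perm_of_pairwise_lt _ _ _ hperm hApw).symm
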